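-- pv_equiv track=rewrite | github.com/Braininhood/Portfolio | CyberSecurity/CIPHER-APPLICATION/cipher_functions.py | fibonacci_cipher
-- ===== SOURCE A (Python) =====
-- import string
--
-- def fibonacci_cipher(message, num_fib, mode='encrypt'):
--     def fibonacci(n):
--         fib_sequence = [0, 1]
--         while len(fib_sequence) < n:
--             fib_sequence.append(fib_sequence[-1] + fib_sequence[-2])
--         return fib_sequence[:n]
--
--     fib_sequence = fibonacci(len(message))
--     result_message = []
--
--     for i, char in enumerate(message):
--         shift_value = fib_sequence[i % num_fib]
--         if mode == 'decrypt':
--             shift_value = -shift_value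
--
--         if char.isdigit():
--             new_char = (int(char) + shift_value) % 10
--             result_message.append(str(new_char))
--
--         elif char.islower():
--             new_char = chr((ord(char) - ord('a') + shift_value) % 26 + ord('a'))
--             result_message.append(new_char)
--
--         elif char.isupper():
--             new_char = chr((ord(char) - ord('A') + shift_value) % 26 + ord('A'))
--             result_message.append(new_char)
--
--         elif char in string.punctuation:
--             special_chars = string.punctuation
--             idx = (special_chars.index(char) + shift_value) % len(special_chars)
--             result_message.append(special_chars[idx])
--
--         else:
--             result_message.append(char)
--
--     return ''.join(result_message)
-- ===== SOURCE B (Python) =====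
-- import string
--
-- # One translation table per Fibonacci residue class: each character is encoded by a
-- # single dict lookup into a precomputed rotated alphabet, instead of per-character
-- # classification and shift arithmetic with full-size Fibonacci integers.
--
-- _SRC = string.digits + string.ascii_lowercase + string.ascii_uppercase + string.punctuation
-- _POS = {c: i for i, c in enumerate(_SRC)}
--
-- def fibonacci_cipher(message, num_fib, mode='encrypt'):
--     sign = -1 if mode == 'decrypt' else 1
--     k = min(num_fib, len(message))
--     tables = []
--     a, b = 0, 1
--     for _ in range(k):
--         s = sign * a
--         row = []
--         for block, m in ((string.digits, 10), (string.ascii_lowercase, 26),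
--                          (string.ascii_uppercase, 26), (string.punctuation, 32)):
--             r = s % m
--             row.append(block[r:] + block[:r])
--         tables.append(''.join(row))
--         a, b = b, (a + b) % 2080  # only residues mod lcm(10, 26, 32) = 2080 matter
--     out = []
--     for i, ch in enumerate(message):
--         j = _POS.get(ch)
--         out.append(ch if j is None else tables[i % num_fib][j])
--     return ''.join(out)
-- ===== Notes on version B (the rewrite author's own statement) =====
-- stated objective: faster
-- what changed: B precomputes one full translation table (rotated digit/lower/upper/punctuation alphabets) per Fibonacci residue class, only min(num_fib, len(message)) of them with the Fibonacci pair kept modulo 2080 = lcm(10,26,32), and then encodes each character by a single dict lookup plus table indexing instead of A's per-character classification, big-integer Fibonacci list of length len(message) and shift arithmetic.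
-- outside the precondition, e.g. on fibonacci_cipher('ab', -2, 'encrypt'): A returns 'ac', B raises IndexError; on fibonacci_cipher('a', -3, 'encrypt'): A returns 'a', B raises IndexError; on fibonacci_cipher('a', 0, 'encrypt'): A raises ZeroDivisionError, B raises ZeroDivisionError
import Mathlib
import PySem

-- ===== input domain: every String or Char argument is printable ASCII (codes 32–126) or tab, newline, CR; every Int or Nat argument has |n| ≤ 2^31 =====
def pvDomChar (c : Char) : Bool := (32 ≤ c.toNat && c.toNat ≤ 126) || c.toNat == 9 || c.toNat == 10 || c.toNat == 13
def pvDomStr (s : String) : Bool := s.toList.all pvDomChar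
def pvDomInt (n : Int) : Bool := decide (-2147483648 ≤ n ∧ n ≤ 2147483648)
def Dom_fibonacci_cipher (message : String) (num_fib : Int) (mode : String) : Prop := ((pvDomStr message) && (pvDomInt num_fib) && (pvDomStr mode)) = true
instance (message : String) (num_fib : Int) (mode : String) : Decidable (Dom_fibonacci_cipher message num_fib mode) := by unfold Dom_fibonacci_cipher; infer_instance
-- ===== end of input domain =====

-- B replaces A's per-character classification + shift arithmetic over a full-length
-- big-integer Fibonacci list by one precomputed rotated-alphabet translation table per
-- Fibonacci residue class (Fibonacci pair kept modulo 2080 = lcm(10,26,32)) and encodes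
-- each character by a single dict lookup plus table indexing (objective: faster).

-- ===== PORT A =====
-- string.punctuation (module-level constant of the Python module, used by both programs)
def pvPunct : List Char := "!\"#$%&'()*+,-./:;<=>?@[\\]^_`{|}~".toList

-- A's inner 'while len(fib_sequence) < n: append(fib[-1] + fib[-2])' loop; the fuel n.toNat
-- bounds the number of appends (the loop runs at most max(0, n-2) times), the guard is A's own
def pvFibLoopA (fuel : Nat) (seq : List Int) (n : Int) : List Int :=
  match fuel with
  | 0 => seq
  | Nat.succ f =>
    if (seq.length : Int) < n then
      pvFibLoopA f (seq ++ [PySem.List.pyGetD seq (-1) 0 + PySem.List.pyGetD seq (-2) 0]) n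
    else seq

-- A's fibonacci(n): build from [0, 1], then slice [:n]
def pvFibA (n : Int) : List Int :=
  PySem.List.slice (pvFibLoopA n.toNat [0, 1] n) none (some n)

-- A's loop body; result_message is kept as List Char (each appended piece is a 1-char string,
-- so ''.join(result_message) is String.ofList of the concatenation, exact)
def pvStepA (fibseq : List Int) (num_fib : Int) (mode : String) (acc : List Char) (p : Int × Char) : List Char :=
  let shift0 := PySem.List.pyGetD fibseq (PySem.Int.mod p.1 num_fib) 0
  let shift := if mode = "decrypt" then -shift0 else shift0
  let char := p.2
  if PySem.Chars.isdigit char then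
    -- str((int(char) + shift_value) % 10); int(char) on a digit char is its digit value, exact
    acc ++ PySem.Int.toChars (PySem.Int.mod (((char.toNat : Int) - 48) + shift) 10)
  else if PySem.Chars.islower char then
    acc ++ [Char.ofNat (PySem.Int.mod ((char.toNat : Int) - 97 + shift) 26 + 97).toNat]
  else if PySem.Chars.isupper char then
    acc ++ [Char.ofNat (PySem.Int.mod ((char.toNat : Int) - 65 + shift) 26 + 65).toNat]
  else if pvPunct.contains char then
    acc ++ [PySem.List.pyGetD pvPunct (PySem.Int.mod (((PySem.List.index? pvPunct char).getD 0 : Int) + shift) (pvPunct.length : Int)) ' ']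
  else
    acc ++ [char]

def fibonacci_cipher (message : String) (num_fib : Int) (mode : String) : String :=
  let fib_sequence := pvFibA (message.toList.length : Int)
  String.ofList ((PySem.List.enumerate message.toList).foldl (pvStepA fib_sequence num_fib mode) [])

-- ===== PORT B =====
-- string.digits, string.ascii_lowercase, string.ascii_uppercase (module-level constants)
def pvDigits : List Char := "0123456789".toList
def pvLower : List Char := "abcdefghijklmnopqrstuvwxyz".toList
def pvUpper : List Char := "ABCDEFGHIJKLMNOPQRSTUVWXYZ".toList

-- B's module-level _SRC and _POS = {c: i for i, c in enumerate(_SRC)}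
def pvSrc : List Char := pvDigits ++ pvLower ++ pvUpper ++ pvPunct
def pvPos : PySem.Dict Char Int :=
  (PySem.List.enumerate pvSrc).foldl (fun d p => d.insert p.2 p.1) PySem.Dict.empty

-- B's rotated block: block[r:] + block[:r] with r = s % m
def pvRot (l : List Char) (m : Int) (s : Int) : List Char :=
  PySem.List.slice l (some (PySem.Int.mod s m)) none ++ PySem.List.slice l none (some (PySem.Int.mod s m))

-- B's ''.join(row): the four rotated blocks concatenated
def pvRowB (s : Int) : List Char :=
  pvRot pvDigits 10 s ++ (pvRot pvLower 26 s ++ (pvRot pvUpper 26 s ++ pvRot pvPunct 32 s))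

-- B's table-building loop: one row per residue class, pair (a, b) kept modulo 2080
def pvTablesB (sign : Int) (k : Nat) (a b : Int) : List (List Char) :=
  match k with
  | 0 => []
  | Nat.succ k' => pvRowB (sign * a) :: pvTablesB sign k' b (PySem.Int.mod (a + b) 2080)

-- B's per-character encoding: _POS.get(ch) then tables[i % num_fib][j]; the two list
-- indexings are always in range under Pre_ (1 ≤ num_fib), hence the total pyGetD form
def pvCharB (tables : List (List Char)) (num_fib : Int) (p : Int × Char) : Char :=
  match PySem.Dict.get? pvPos p.2 with
  | none => p.2
  | some j => PySem.List.pyGetD (PySem.List.pyGetD tables (PySem.Int.mod p.1 num_fib) []) j p.2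

def fibonacci_cipher_alt (message : String) (num_fib : Int) (mode : String) : String :=
  let sign : Int := if mode = "decrypt" then -1 else 1
  let k := min num_fib (message.toList.length : Int)
  let tables := pvTablesB sign k.toNat 0 1
  String.ofList ((PySem.List.enumerate message.toList).foldl
    (fun acc p => acc ++ [pvCharB tables num_fib p]) [])

-- ===== PRECONDITION & SPEC =====
-- Pre_ excludes num_fib ≤ 0 with a nonempty message: there A raises ZeroDivisionError (num_fib = 0)
-- or, for negative num_fib, either raises IndexError or returns shifts picked by accidental
-- negative-index wraparound into its Fibonacci list, while B raises IndexError.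
def Pre_fibonacci_cipher (message : String) (num_fib : Int) (mode : String) : Prop :=
  message.toList = [] ∨ 1 ≤ num_fib
instance (message : String) (num_fib : Int) (mode : String) : Decidable (Pre_fibonacci_cipher message num_fib mode) := by unfold Pre_fibonacci_cipher; infer_instance

def pvWitness_fibonacci_cipher : String × Int × String := ("Hi!", 2, "encrypt")

def Spec_fibonacci_cipher (message : String) (num_fib : Int) (mode : String) (out : String) : Prop := out = fibonacci_cipher_alt message num_fib mode
instance (message : String) (num_fib : Int) (mode : String) (out : String) : Decidable (Spec_fibonacci_cipher message num_fib mode out) := by unfold Spec_fibonacci_cipher; infer_instance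

-- ===== CLAIM (what is proved, stated in full; the proofs are below) =====
def Claim_equal_fibonacci_cipher : Prop := ∀ (message : String) (num_fib : Int) (mode : String), Dom_fibonacci_cipher message num_fib mode → Pre_fibonacci_cipher message num_fib mode → Spec_fibonacci_cipher message num_fib mode (fibonacci_cipher message num_fib mode)

-- ===== LEMMAS AND PROOFS =====

-- the mathematical Fibonacci sequence
def pvMathFib : Nat → Int
  | 0 => 0
  | 1 => 1
  | n+2 => pvMathFib n + pvMathFib (n+1)

def pvFibList (m : Nat) : List Int := (List.range m).map pvMathFib

lemma pvFibList_append (m : Nat) (h2 : 2 ≤ m) :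
    pvFibList m ++ [PySem.List.pyGetD (pvFibList m) (-1) 0 + PySem.List.pyGetD (pvFibList m) (-2) 0]
      = pvFibList (m + 1) := by
  obtain ⟨a, rfl⟩ : ∃ a, m = a + 2 := ⟨m - 2, by omega⟩
  have hlen : (pvFibList (a + 2)).length = a + 2 := by simp [pvFibList]
  have h1 : PySem.List.pyGetD (pvFibList (a + 2)) (-1) 0 = pvMathFib (a + 1) := by
    rw [PySem.List.pyGetD_neg_ofNat _ 1 0 (by omega) (by omega)]
    simp [pvFibList]
  have h2' : PySem.List.pyGetD (pvFibList (a + 2)) (-2) 0 = pvMathFib a := by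
    rw [PySem.List.pyGetD_neg_ofNat _ 2 0 (by omega) (by omega)]
    simp [pvFibList]
  rw [h1, h2']
  have : pvMathFib (a + 1) + pvMathFib a = pvMathFib (a + 2) := by
    rw [show pvMathFib (a + 2) = pvMathFib a + pvMathFib (a + 1) from rfl]; ring
  rw [this]
  simp [pvFibList, List.range_succ]

lemma pvFibLoopA_eq (fuel : Nat) : ∀ (m : Nat) (n : Int), 2 ≤ m → n ≤ (m : Int) + fuel →
    pvFibLoopA fuel (pvFibList m) n = pvFibList (max m n.toNat) := by
  induction fuel with
  | zero =>
    intro m n h2 hf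
    have h : n.toNat ≤ m := by omega
    rw [pvFibLoopA, Nat.max_eq_left h]
  | succ f ih =>
    intro m n h2 hf
    rw [pvFibLoopA]
    have hlen : ((pvFibList m).length : Int) = (m : Int) := by simp [pvFibList]
    by_cases hc : ((pvFibList m).length : Int) < n
    · rw [if_pos hc, pvFibList_append m h2, ih (m + 1) n (by omega) (by push_cast; push_cast at hf; omega)]
      rw [hlen] at hc
      congr 1
      omega
    · rw [if_neg hc]
      rw [hlen] at hc
      have h : n.toNat ≤ m := by omega
      rw [Nat.max_eq_left h]

lemma pvFibA_eq (n : Int) (h : 0 ≤ n) : pvFibA n = pvFibList n.toNat := by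
  have h01 : ([0, 1] : List Int) = pvFibList 2 := by decide
  have hle : n ≤ ((2 : Nat) : Int) + (n.toNat : Int) := by push_cast; omega
  rw [pvFibA, h01, pvFibLoopA_eq n.toNat 2 n (by omega) hle,
      PySem.List.slice_to _ h]
  unfold pvFibList
  rw [← List.map_take, List.take_range]
  congr 1
  exact congrArg List.range (Nat.min_eq_left (Nat.le_max_right 2 n.toNat))

-- B's table loop produces the rows for the Fibonacci residues
lemma pvTablesB_eq (sign : Int) (k : Nat) : ∀ m : Nat,
    pvTablesB sign k (pvMathFib m % 2080) (pvMathFib (m + 1) % 2080)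
      = (List.range k).map (fun u => pvRowB (sign * (pvMathFib (m + u) % 2080))) := by
  induction k with
  | zero => intro m; simp [pvTablesB]
  | succ k ih =>
    intro m
    rw [pvTablesB]
    have hmod : PySem.Int.mod (pvMathFib m % 2080 + pvMathFib (m + 1) % 2080) 2080
        = pvMathFib (m + 2) % 2080 := by
      rw [PySem.Int.mod_eq_emod_of_pos (by norm_num),
          show pvMathFib (m + 2) = pvMathFib m + pvMathFib (m + 1) from rfl]
      omega
    rw [hmod, show pvMathFib (m + 2) % 2080 = pvMathFib ((m + 1) + 1) % 2080 from rfl, ih (m + 1),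
        List.range_succ_eq_map]
    simp only [List.map_cons, List.map_map]
    refine congrArg₂ List.cons (by simp) (List.map_congr_left ?_)
    intro a ha
    show pvRowB (sign * (pvMathFib (m + 1 + a) % 2080)) = pvRowB (sign * (pvMathFib (m + (a + 1)) % 2080))
    have h' : m + 1 + a = m + (a + 1) := by omega
    rw [h']

lemma isdigit_iff (c : Char) : PySem.Chars.isdigit c = true ↔ ('0' ≤ c ∧ c ≤ '9') := by
  simp [PySem.Chars.isdigit]

lemma islower_iff (c : Char) : PySem.Chars.islower c = true ↔ ('a' ≤ c ∧ c ≤ 'z') := by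
  simp [PySem.Chars.islower]

lemma isupper_iff (c : Char) : PySem.Chars.isupper c = true ↔ ('A' ≤ c ∧ c ≤ 'Z') := by
  simp [PySem.Chars.isupper]

lemma toChars_digit (x : Int) (h0 : 0 ≤ x) (h9 : x < 10) :
    PySem.Int.toChars x = [Char.ofNat (x + 48).toNat] := by
  interval_cases x <;> decide

-- _POS, evaluated: the dict built by the comprehension is the association list itself
set_option maxRecDepth 8192 in
lemma pvPos_mk : pvPos = PySem.Dict.mk ((PySem.List.enumerate pvSrc).map (fun p => (p.2, p.1))) := by
  decide

lemma get?_enum (ch : Char) (l : List Char) : ∀ (s : Int),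
    PySem.Dict.get? (PySem.Dict.mk ((PySem.List.enumerate l s).map (fun p => (p.2, p.1)))) ch
      = (List.idxOf? ch l).map (fun n => s + n) := by
  induction l with
  | nil => intro s; simp [PySem.List.enumerate_nil, PySem.Dict.get?]
  | cons x xs ih =>
    intro s
    rw [PySem.List.enumerate_cons, List.map_cons, PySem.Dict.get?_mk_cons, List.idxOf?_cons, ih (s + 1)]
    by_cases h : x == ch
    · simp [h]
    · cases List.idxOf? ch xs <;> simp [h] <;> omega

lemma pvPos_get (ch : Char) :
    PySem.Dict.get? pvPos ch = Option.map (fun n : Nat => (n : Int)) (List.idxOf? ch pvSrc) := by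
  rw [pvPos_mk, get?_enum]
  cases List.idxOf? ch pvSrc <;> simp

-- positions of the four character classes in _SRC, and their glyphs
lemma src_digit : ∀ d : Fin 10, List.idxOf? (Char.ofNat (48 + (d : Nat))) pvSrc = some (d : Nat) := by decide
lemma src_lower : ∀ d : Fin 26, List.idxOf? (Char.ofNat (97 + (d : Nat))) pvSrc = some (10 + (d : Nat)) := by decide
lemma src_upper : ∀ d : Fin 26, List.idxOf? (Char.ofNat (65 + (d : Nat))) pvSrc = some (36 + (d : Nat)) := by decide
lemma src_punct : ∀ d : Fin 32, List.idxOf? (pvPunct.getD (d : Nat) ' ') pvSrc = some (62 + (d : Nat)) := by decide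
lemma punct_index : ∀ d : Fin 32, PySem.List.index? pvPunct (pvPunct.getD (d : Nat) ' ') = some (d : Nat) := by decide
lemma digit_glyph (u : Nat) (hu : u < 10) (dflt : Char) : pvDigits.getD u dflt = Char.ofNat (48 + u) := by
  interval_cases u <;> rfl
lemma lower_glyph (u : Nat) (hu : u < 26) (dflt : Char) : pvLower.getD u dflt = Char.ofNat (97 + u) := by
  interval_cases u <;> rfl
lemma upper_glyph (u : Nat) (hu : u < 26) (dflt : Char) : pvUpper.getD u dflt = Char.ofNat (65 + u) := by
  interval_cases u <;> rfl
lemma digit_toNat (c : Char) : ('0' ≤ c ∧ c ≤ '9') ↔ (48 ≤ c.toNat ∧ c.toNat ≤ 57) := by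
  rw [Char.le_def, Char.le_def, UInt32.le_iff_toNat_le, UInt32.le_iff_toNat_le]
  exact Iff.rfl
lemma lower_toNat (c : Char) : ('a' ≤ c ∧ c ≤ 'z') ↔ (97 ≤ c.toNat ∧ c.toNat ≤ 122) := by
  rw [Char.le_def, Char.le_def, UInt32.le_iff_toNat_le, UInt32.le_iff_toNat_le]
  exact Iff.rfl
lemma upper_toNat (c : Char) : ('A' ≤ c ∧ c ≤ 'Z') ↔ (65 ≤ c.toNat ∧ c.toNat ≤ 90) := by
  rw [Char.le_def, Char.le_def, UInt32.le_iff_toNat_le, UInt32.le_iff_toNat_le]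
  exact Iff.rfl
set_option maxRecDepth 2048 in
lemma src_class : pvSrc.all (fun ch => (48 ≤ ch.toNat && ch.toNat ≤ 57) || (97 ≤ ch.toNat && ch.toNat ≤ 122) || (65 ≤ ch.toNat && ch.toNat ≤ 90) || pvPunct.contains ch) = true := by decide

lemma rot_getD (l : List Char) (r j : Nat) (d : Char) (hr : r < l.length) (hj : j < l.length) :
    (l.drop r ++ l.take r).getD j d = l.getD ((j + r) % l.length) d := by
  have hlen : (l.drop r ++ l.take r).length = l.length := by simp; omega
  rw [List.getD_eq_getElem _ _ (by omega), List.getD_eq_getElem _ _ (Nat.mod_lt _ (by omega))]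
  by_cases h : j < l.length - r
  · rw [List.getElem_append_left (by simp; omega), List.getElem_drop]
    congr 1
    have := Nat.mod_eq_of_lt (show j + r < l.length by omega)
    omega
  · rw [List.getElem_append_right (by simp; omega), List.getElem_take]
    congr 1
    have h1 := Nat.mod_eq_sub_mod (show l.length ≤ j + r by omega)
    have h2 := Nat.mod_eq_of_lt (show j + r - l.length < l.length by omega)
    simp only [List.length_drop]
    omega

lemma pvRot_eq (l : List Char) (m s : Int) (hm : 0 < m) :
    pvRot l m s = l.drop (PySem.Int.mod s m).toNat ++ l.take (PySem.Int.mod s m).toNat := by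
  unfold pvRot
  rw [PySem.List.slice_from _ (PySem.Int.mod_nonneg _ hm), PySem.List.slice_to _ (PySem.Int.mod_nonneg _ hm)]

-- one lookup in B's row: the four rotated blocks, by global position
lemma row_get (s : Int) (j : Nat) (hj : j < 94) (dflt : Char) :
    (pvRowB s).getD j dflt =
      if j < 10 then Char.ofNat (48 + (j + (PySem.Int.mod s 10).toNat) % 10)
      else if j < 36 then Char.ofNat (97 + ((j - 10) + (PySem.Int.mod s 26).toNat) % 26)
      else if j < 62 then Char.ofNat (65 + ((j - 36) + (PySem.Int.mod s 26).toNat) % 26)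
      else pvPunct.getD (((j - 62) + (PySem.Int.mod s 32).toNat) % 32) dflt := by
  have h10a := PySem.Int.mod_nonneg s (show (0:Int) < 10 by norm_num)
  have h10b := PySem.Int.mod_lt s (show (0:Int) < 10 by norm_num)
  have h26a := PySem.Int.mod_nonneg s (show (0:Int) < 26 by norm_num)
  have h26b := PySem.Int.mod_lt s (show (0:Int) < 26 by norm_num)
  have h32a := PySem.Int.mod_nonneg s (show (0:Int) < 32 by norm_num)
  have h32b := PySem.Int.mod_lt s (show (0:Int) < 32 by norm_num)
  have hr10 : (PySem.Int.mod s 10).toNat < 10 := by omega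
  have hr26 : (PySem.Int.mod s 26).toNat < 26 := by omega
  have hr32 : (PySem.Int.mod s 32).toNat < 32 := by omega
  have hld : pvDigits.length = 10 := rfl
  have hll : pvLower.length = 26 := rfl
  have hlu : pvUpper.length = 26 := rfl
  have hlp : pvPunct.length = 32 := rfl
  rw [pvRowB, pvRot_eq pvDigits 10 s (by norm_num), pvRot_eq pvLower 26 s (by norm_num),
      pvRot_eq pvUpper 26 s (by norm_num), pvRot_eq pvPunct 32 s (by norm_num)]
  have l1 : (pvDigits.drop (PySem.Int.mod s 10).toNat ++ pvDigits.take (PySem.Int.mod s 10).toNat).length = 10 := by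
    simp [hld]; omega
  have l2 : (pvLower.drop (PySem.Int.mod s 26).toNat ++ pvLower.take (PySem.Int.mod s 26).toNat).length = 26 := by
    simp [hll]; omega
  have l3 : (pvUpper.drop (PySem.Int.mod s 26).toNat ++ pvUpper.take (PySem.Int.mod s 26).toNat).length = 26 := by
    simp [hlu]; omega
  split_ifs with c1 c2 c3
  · rw [List.getD_append _ _ _ _ (by omega),
        rot_getD pvDigits _ j dflt (by omega) (by omega), digit_glyph _ (by rw [hld]; exact Nat.mod_lt _ (by omega)) dflt, hld]
  · rw [List.getD_append_right _ _ _ _ (by omega), l1,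
        List.getD_append _ _ _ _ (by omega),
        rot_getD pvLower _ (j - 10) dflt (by omega) (by omega), lower_glyph _ (by rw [hll]; exact Nat.mod_lt _ (by omega)) dflt, hll]
  · rw [List.getD_append_right _ _ _ _ (by omega), l1,
        List.getD_append_right _ _ _ _ (by omega), l2,
        List.getD_append _ _ _ _ (by omega),
        rot_getD pvUpper _ (j - 10 - 26) dflt (by omega) (by omega), upper_glyph _ (by rw [hlu]; exact Nat.mod_lt _ (by omega)) dflt, hlu,
        show j - 10 - 26 = j - 36 from by omega]
  · rw [List.getD_append_right _ _ _ _ (by omega), l1,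
        List.getD_append_right _ _ _ _ (by omega), l2,
        List.getD_append_right _ _ _ _ (by omega), l3,
        rot_getD pvPunct _ (j - 10 - 26 - 26) dflt (by omega) (by omega), hlp,
        show j - 10 - 26 - 26 = j - 62 from by omega]

-- the two loop bodies produce the same character whenever the shifts agree modulo 2080
lemma pvBody_eq (acc : List Char) (ch : Char) (s t : Int) (hst : s % 2080 = t % 2080) :
    (if PySem.Chars.isdigit ch then
        acc ++ PySem.Int.toChars (PySem.Int.mod (((ch.toNat : Int) - 48) + t) 10)
      else if PySem.Chars.islower ch then
        acc ++ [Char.ofNat (PySem.Int.mod ((ch.toNat : Int) - 97 + t) 26 + 97).toNat]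
      else if PySem.Chars.isupper ch then
        acc ++ [Char.ofNat (PySem.Int.mod ((ch.toNat : Int) - 65 + t) 26 + 65).toNat]
      else if pvPunct.contains ch then
        acc ++ [PySem.List.pyGetD pvPunct (PySem.Int.mod (((PySem.List.index? pvPunct ch).getD 0 : Int) + t) (pvPunct.length : Int)) ' ']
      else acc ++ [ch])
    = acc ++ [match PySem.Dict.get? pvPos ch with
              | none => ch
              | some j => PySem.List.pyGetD (pvRowB s) j ch] := by
  have hpos := pvPos_get ch
  by_cases h1 : '0' ≤ ch ∧ ch ≤ '9'
  · have hn := (digit_toNat ch).mp h1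
    have hch : ch = Char.ofNat (48 + (ch.toNat - 48)) := by
      rw [show 48 + (ch.toNat - 48) = ch.toNat from by omega, Char.ofNat_toNat]
    have hidx : List.idxOf? ch pvSrc = some (ch.toNat - 48) := by
      conv_lhs => rw [hch]
      exact src_digit ⟨ch.toNat - 48, by omega⟩
    have hBchar : (match PySem.Dict.get? pvPos ch with
        | none => ch
        | some j => PySem.List.pyGetD (pvRowB s) j ch)
        = Char.ofNat (48 + ((ch.toNat - 48) + (PySem.Int.mod s 10).toNat) % 10) := by
      rw [hpos, hidx, Option.map_some]
      show PySem.List.pyGetD (pvRowB s) ((ch.toNat - 48 : Nat) : Int) ch = _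
      rw [PySem.List.pyGetD_natCast, row_get s _ (by omega) ch, if_pos (by omega)]
    rw [if_pos ((isdigit_iff ch).mpr h1), hBchar,
        toChars_digit _ (PySem.Int.mod_nonneg _ (by norm_num)) (PySem.Int.mod_lt _ (by norm_num)),
        show (PySem.Int.mod ((ch.toNat : Int) - 48 + t) 10 + 48).toNat
            = 48 + ((ch.toNat - 48) + (PySem.Int.mod s 10).toNat) % 10 from by
          rw [PySem.Int.mod_eq_emod_of_pos (show (0:Int) < 10 by norm_num),
              PySem.Int.mod_eq_emod_of_pos (show (0:Int) < 10 by norm_num)]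
          omega]
  · by_cases h2 : 'a' ≤ ch ∧ ch ≤ 'z'
    · have hn := (lower_toNat ch).mp h2
      have hch : ch = Char.ofNat (97 + (ch.toNat - 97)) := by
        rw [show 97 + (ch.toNat - 97) = ch.toNat from by omega, Char.ofNat_toNat]
      have hidx : List.idxOf? ch pvSrc = some (10 + (ch.toNat - 97)) := by
        conv_lhs => rw [hch]
        exact src_lower ⟨ch.toNat - 97, by omega⟩
      have hBchar : (match PySem.Dict.get? pvPos ch with
          | none => ch
          | some j => PySem.List.pyGetD (pvRowB s) j ch)
          = Char.ofNat (97 + ((ch.toNat - 97) + (PySem.Int.mod s 26).toNat) % 26) := by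
        rw [hpos, hidx, Option.map_some]
        show PySem.List.pyGetD (pvRowB s) ((10 + (ch.toNat - 97) : Nat) : Int) ch = _
        rw [PySem.List.pyGetD_natCast, row_get s _ (by omega) ch,
            if_neg (by omega), if_pos (by omega),
            show 10 + (ch.toNat - 97) - 10 = ch.toNat - 97 from by omega]
      rw [if_neg (fun hc => h1 ((isdigit_iff ch).mp hc)),
          if_pos ((islower_iff ch).mpr h2), hBchar,
          show (PySem.Int.mod ((ch.toNat : Int) - 97 + t) 26 + 97).toNat
              = 97 + ((ch.toNat - 97) + (PySem.Int.mod s 26).toNat) % 26 from by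
            rw [PySem.Int.mod_eq_emod_of_pos (show (0:Int) < 26 by norm_num),
                PySem.Int.mod_eq_emod_of_pos (show (0:Int) < 26 by norm_num)]
            omega]
    · by_cases h3 : 'A' ≤ ch ∧ ch ≤ 'Z'
      · have hn := (upper_toNat ch).mp h3
        have hch : ch = Char.ofNat (65 + (ch.toNat - 65)) := by
          rw [show 65 + (ch.toNat - 65) = ch.toNat from by omega, Char.ofNat_toNat]
        have hidx : List.idxOf? ch pvSrc = some (36 + (ch.toNat - 65)) := by
          conv_lhs => rw [hch]
          exact src_upper ⟨ch.toNat - 65, by omega⟩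
        have hBchar : (match PySem.Dict.get? pvPos ch with
            | none => ch
            | some j => PySem.List.pyGetD (pvRowB s) j ch)
            = Char.ofNat (65 + ((ch.toNat - 65) + (PySem.Int.mod s 26).toNat) % 26) := by
          rw [hpos, hidx, Option.map_some]
          show PySem.List.pyGetD (pvRowB s) ((36 + (ch.toNat - 65) : Nat) : Int) ch = _
          rw [PySem.List.pyGetD_natCast, row_get s _ (by omega) ch,
              if_neg (by omega), if_neg (by omega), if_pos (by omega),
              show 36 + (ch.toNat - 65) - 36 = ch.toNat - 65 from by omega]
        rw [if_neg (fun hc => h1 ((isdigit_iff ch).mp hc)),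
            if_neg (fun hc => h2 ((islower_iff ch).mp hc)),
            if_pos ((isupper_iff ch).mpr h3), hBchar,
            show (PySem.Int.mod ((ch.toNat : Int) - 65 + t) 26 + 65).toNat
                = 65 + ((ch.toNat - 65) + (PySem.Int.mod s 26).toNat) % 26 from by
              rw [PySem.Int.mod_eq_emod_of_pos (show (0:Int) < 26 by norm_num),
                  PySem.Int.mod_eq_emod_of_pos (show (0:Int) < 26 by norm_num)]
              omega]
      · by_cases h4 : ch ∈ pvPunct
        · obtain ⟨d, hd, hch⟩ := List.mem_iff_getElem.mp h4
          have hd32 : d < 32 := by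
            have : pvPunct.length = 32 := rfl
            omega
          have hgd : pvPunct.getD d ' ' = ch := by rw [List.getD_eq_getElem _ _ hd, hch]
          have hidx : List.idxOf? ch pvSrc = some (62 + d) := by
            rw [← hgd]
            exact src_punct ⟨d, hd32⟩
          have hpidx : PySem.List.index? pvPunct ch = some d := by
            rw [← hgd]
            exact punct_index ⟨d, hd32⟩
          have hBchar : (match PySem.Dict.get? pvPos ch with
              | none => ch
              | some j => PySem.List.pyGetD (pvRowB s) j ch)
              = pvPunct.getD ((d + (PySem.Int.mod s 32).toNat) % 32) ch := by
            rw [hpos, hidx, Option.map_some]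
            show PySem.List.pyGetD (pvRowB s) ((62 + d : Nat) : Int) ch = _
            rw [PySem.List.pyGetD_natCast, row_get s _ (by omega) ch,
                if_neg (by omega), if_neg (by omega), if_neg (by omega),
                show 62 + d - 62 = d from by omega]
          have hmodlt := PySem.Int.mod_lt ((d : Int) + t) (show (0:Int) < 32 by norm_num)
          have hmodge := PySem.Int.mod_nonneg ((d : Int) + t) (show (0:Int) < 32 by norm_num)
          have key : (d + (PySem.Int.mod s 32).toNat) % 32 = (PySem.Int.mod ((d : Int) + t) 32).toNat := by
            rw [PySem.Int.mod_eq_emod_of_pos (show (0:Int) < 32 by norm_num)] at hmodlt hmodge ⊢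
            rw [PySem.Int.mod_eq_emod_of_pos (show (0:Int) < 32 by norm_num)]
            omega
          rw [if_neg (fun hc => h1 ((isdigit_iff ch).mp hc)),
              if_neg (fun hc => h2 ((islower_iff ch).mp hc)),
              if_neg (fun hc => h3 ((isupper_iff ch).mp hc)),
              if_pos (by simpa using h4), hpidx, Option.getD_some, hBchar, key,
              show ((pvPunct.length : Nat) : Int) = 32 from rfl]
          rw [PySem.List.pyGetD_eq_getElem _ _ hmodge (by rw [show ((pvPunct.length : Nat) : Int) = 32 from rfl]; omega),
              List.getD_eq_getElem _ _ (by rw [show pvPunct.length = 32 from rfl]; omega)]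
        · have hmem : ch ∉ pvSrc := by
            intro hm
            have hcls := List.all_eq_true.mp src_class ch hm
            simp only [Bool.or_eq_true, Bool.and_eq_true, decide_eq_true_eq,
              List.contains_eq_mem] at hcls
            rcases hcls with ((hc | hc) | hc) | hc
            · exact h1 ((digit_toNat ch).mpr hc)
            · exact h2 ((lower_toNat ch).mpr hc)
            · exact h3 ((upper_toNat ch).mpr hc)
            · exact h4 hc
          rw [if_neg (fun hc => h1 ((isdigit_iff ch).mp hc)),
              if_neg (fun hc => h2 ((islower_iff ch).mp hc)),
              if_neg (fun hc => h3 ((isupper_iff ch).mp hc)),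
              if_neg (by simpa using h4), hpos,
              List.idxOf?_eq_none_iff.mpr hmem, Option.map_none]

set_option maxRecDepth 16384 in
lemma step_eq (len : Nat) (num_fib : Int) (mode : String) (acc : List Char) (i : Int) (ch : Char)
    (hnf : 1 ≤ num_fib) (h0 : 0 ≤ i) (hi : i < (len : Int)) :
    pvStepA (pvFibList len) num_fib mode acc (i, ch)
      = acc ++ [pvCharB (pvTablesB (if mode = "decrypt" then -1 else 1) (min num_fib (len : Int)).toNat 0 1) num_fib (i, ch)] := by
  have hnf0 : (0 : Int) < num_fib := by omega
  have hj0 : 0 ≤ PySem.Int.mod i num_fib := PySem.Int.mod_nonneg i hnf0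
  have hjnf : PySem.Int.mod i num_fib < num_fib := PySem.Int.mod_lt i hnf0
  have hji : PySem.Int.mod i num_fib ≤ i := by
    rw [PySem.Int.mod_eq_emod_of_pos hnf0]
    have hq : 0 ≤ num_fib * (i / num_fib) := mul_nonneg (by omega) (Int.ediv_nonneg h0 (by omega))
    have he := Int.mul_ediv_add_emod i num_fib
    omega
  set j := PySem.Int.mod i num_fib with hjdef
  have hjlen : j < (len : Int) := lt_of_le_of_lt hji hi
  have hA : PySem.List.pyGetD (pvFibList len) j 0 = pvMathFib j.toNat := by
    rw [PySem.List.pyGetD_eq_getElem _ 0 hj0 (by simp [pvFibList]; omega)]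
    simp [pvFibList]
  set sign : Int := (if mode = "decrypt" then -1 else 1) with hsign
  have htab : pvTablesB sign (min num_fib (len : Int)).toNat 0 1
      = (List.range (min num_fib (len : Int)).toNat).map (fun u => pvRowB (sign * (pvMathFib u % 2080))) := by
    have h := pvTablesB_eq sign (min num_fib (len : Int)).toNat 0
    norm_num [pvMathFib] at h
    simpa using h
  have hkj : j.toNat < (min num_fib (len : Int)).toNat := by omega
  have hB : PySem.List.pyGetD (pvTablesB sign (min num_fib (len : Int)).toNat 0 1) j ([] : List Char)
      = pvRowB (sign * (pvMathFib j.toNat % 2080)) := by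
    rw [htab, PySem.List.pyGetD_eq_getElem _ _ hj0 (by simp; omega)]
    simp
  by_cases hm : mode = "decrypt"
  · have hst : ((-1 : Int) * (pvMathFib j.toNat % 2080)) % 2080 = (-(pvMathFib j.toNat)) % 2080 := by
      omega
    have hs' : sign = -1 := by rw [hsign, if_pos hm]
    rw [hs'] at hB
    unfold pvStepA pvCharB
    simp only [hm, ← hjdef, hA, hs', hB, if_pos]
    exact pvBody_eq acc ch _ _ hst
  · have hst : ((1 : Int) * (pvMathFib j.toNat % 2080)) % 2080 = (pvMathFib j.toNat) % 2080 := by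
      omega
    have hs' : sign = 1 := by rw [hsign, if_neg hm]
    rw [hs'] at hB
    unfold pvStepA pvCharB
    simp only [hm, ← hjdef, hA, hs', hB]
    exact pvBody_eq acc ch _ _ hst

lemma mem_enumerate_bounds {α : Type} (xs : List α) : ∀ (s : Int) (p : Int × α),
    p ∈ PySem.List.enumerate xs s → s ≤ p.1 ∧ p.1 < s + xs.length := by
  induction xs with
  | nil => intro s p h; simp [PySem.List.enumerate_nil] at h
  | cons x xs ih =>
    intro s p h
    rw [PySem.List.enumerate_cons, List.mem_cons] at h
    rcases h with h | h
    · subst h; simp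
    · have := ih (s + 1) p h
      simp at this ⊢
      omega

-- ===== VERDICT (by name: the statement is the Claim_ definition above) =====
theorem fibonacci_cipher_spec : Claim_equal_fibonacci_cipher := by
  intro message num_fib mode _ hpre
  unfold Spec_fibonacci_cipher fibonacci_cipher fibonacci_cipher_alt
  rcases hpre with hempty | hnf
  · rw [hempty]
    simp [PySem.List.enumerate_nil]
  · rw [pvFibA_eq _ (by positivity), Int.toNat_natCast]
    apply congrArg String.ofList
    apply PySem.List.foldl_congr_mem
    intro acc p hp
    have hb := mem_enumerate_bounds message.toList 0 p hp
    obtain ⟨i, chp⟩ := p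
    have hb1 : 0 ≤ i := by simpa using hb.1
    have hb2 : i < (message.toList.length : Int) := by simpa using hb.2
    exact step_eq message.toList.length num_fib mode acc i chp hnf hb1 hb2
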